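-- pv_equiv track=rewrite | github.com/HafidzNaufal05/POS-Tagging-Hidden-Markov-Model | test.py | Compare2List
-- ===== SOURCE A (Python) =====
-- def Compare2List(list1,list2,list3):
--     i = 0
--     while i < len(list1):
--         if list1[i] == list2[i]:
--             list3[0] += 1
--         else:
--             list3[1] += 1
--         i += 1
--
--     return list3
-- ===== SOURCE B (Python) =====
-- def Compare2List(list1, list2, list3):
--     # Divide and conquer: count (matches, mismatches) on index range [lo, hi)
--     # by splitting it in half and adding the two sub-counts.
--     def count(lo, hi):
--         if hi - lo == 0:
--             return (0, 0)
--         if hi - lo == 1: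
--             return (1, 0) if list1[lo] == list2[lo] else (0, 1)
--         mid = (lo + hi) // 2
--         m1, x1 = count(lo, mid)
--         m2, x2 = count(mid, hi)
--         return (m1 + m2, x1 + x2)
--     m, x = count(0, len(list1))
--     list3[0] += m
--     list3[1] += x
--     return list3
-- ===== Notes on version B (the rewrite author's own statement) =====
-- stated objective: alternative
-- what changed: B counts (matches, mismatches) by divide-and-conquer over the index range, splitting it in half and adding the sub-counts, then applies each counter increment to list3 once, instead of A's linear left-to-right loop incrementing list3 cell-by-cell.
-- outside the precondition, e.g. on Compare2List([], [], []): A returns [], B raises IndexError; on Compare2List([1], [1], [0]): A returns [1], B raises IndexError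
import Mathlib
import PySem

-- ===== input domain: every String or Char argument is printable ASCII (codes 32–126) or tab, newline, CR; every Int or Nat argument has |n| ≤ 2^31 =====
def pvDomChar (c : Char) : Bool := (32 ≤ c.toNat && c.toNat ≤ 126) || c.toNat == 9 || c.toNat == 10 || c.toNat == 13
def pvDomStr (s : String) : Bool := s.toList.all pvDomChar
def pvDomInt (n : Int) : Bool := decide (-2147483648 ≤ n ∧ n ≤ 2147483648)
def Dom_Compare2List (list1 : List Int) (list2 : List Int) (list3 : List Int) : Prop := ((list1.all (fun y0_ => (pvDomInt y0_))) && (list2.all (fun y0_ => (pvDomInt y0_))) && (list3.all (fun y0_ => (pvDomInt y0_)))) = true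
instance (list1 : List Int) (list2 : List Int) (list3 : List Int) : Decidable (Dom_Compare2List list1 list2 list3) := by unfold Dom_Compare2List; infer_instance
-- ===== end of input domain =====

-- B counts (matches, mismatches) by divide-and-conquer on the index range and applies each
-- counter increment once (alternative decomposition, same cost). Return-value equivalence only:
-- both Pythons mutate list3 in place (A cell-by-cell in the loop, B with two compound
-- assignments; same net effect on list3).

-- ===== PORT A =====
-- 'while i < len(list1)' with list1[i] == list2[i]; the index raises in Python where
-- out of range — those inputs lie outside Pre_, here getD supplies a default.
def Compare2ListLoop (list1 : List Int) (list2 : List Int) (i : Nat) (list3 : List Int) : List Int :=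
  if _h : i < list1.length then
    let list3' :=
      if list1.getD i 0 == list2.getD i 0 then
        list3.set 0 (list3.getD 0 0 + 1)
      else
        list3.set 1 (list3.getD 1 0 + 1)
    Compare2ListLoop list1 list2 (i + 1) list3'
  else list3
termination_by list1.length - i

def Compare2List (list1 : List Int) (list2 : List Int) (list3 : List Int) : List Int :=
  Compare2ListLoop list1 list2 0 list3

-- ===== PORT B =====
-- count(lo, hi): (matches, mismatches) on [lo, hi), by splitting the range at mid;
-- indexing is exact inside Pre_ (list2 at least as long as list1).
def Compare2ListCount (list1 : List Int) (list2 : List Int) (lo hi : Nat) : Int × Int :=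
  if hi - lo = 0 then (0, 0)
  else if hi - lo = 1 then
    if list1.getD lo 0 == list2.getD lo 0 then (1, 0) else (0, 1)
  else
    let mid := (lo + hi) / 2
    let p1 := Compare2ListCount list1 list2 lo mid
    let p2 := Compare2ListCount list1 list2 mid hi
    (p1.1 + p2.1, p1.2 + p2.2)
termination_by hi - lo
decreasing_by all_goals omega

def Compare2List_alt (list1 : List Int) (list2 : List Int) (list3 : List Int) : List Int :=
  let p := Compare2ListCount list1 list2 0 list1.length
  let l3a := list3.set 0 (list3.getD 0 0 + p.1)
  l3a.set 1 (l3a.getD 1 0 + p.2)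

-- ===== PRECONDITION & SPEC =====
-- Pre_ requires list2 at least as long as list1 (a shorter list2 makes A raise IndexError) and
-- list3 to have at least two cells: with fewer, B always raises IndexError, while A happens to
-- return when it never increments the missing cell (e.g. empty list1, or all matches with one cell).
def Pre_Compare2List (list1 : List Int) (list2 : List Int) (list3 : List Int) : Prop :=
  list1.length ≤ list2.length ∧ 2 ≤ list3.length
instance (list1 : List Int) (list2 : List Int) (list3 : List Int) : Decidable (Pre_Compare2List list1 list2 list3) := by unfold Pre_Compare2List; infer_instance

def pvWitness_Compare2List : List Int × List Int × List Int := ([1, 2, 3], [1, 0, 3], [0, 0])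

def Spec_Compare2List (list1 : List Int) (list2 : List Int) (list3 : List Int) (out : List Int) : Prop := out = Compare2List_alt list1 list2 list3
instance (list1 : List Int) (list2 : List Int) (list3 : List Int) (out : List Int) : Decidable (Spec_Compare2List list1 list2 list3 out) := by unfold Spec_Compare2List; infer_instance

-- ===== CLAIM (what is proved, stated in full; the proofs are below) =====
def Claim_equal_Compare2List : Prop := ∀ (list1 : List Int) (list2 : List Int) (list3 : List Int), Dom_Compare2List list1 list2 list3 → Pre_Compare2List list1 list2 list3 → Spec_Compare2List list1 list2 list3 (Compare2List list1 list2 list3)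

-- ===== LEMMAS AND PROOFS =====

-- the per-index match predicate both ports test
def pvMatchP (list1 list2 : List Int) (j : Nat) : Bool := list1.getD j 0 == list2.getD j 0

lemma Compare2ListLoop_spec (list1 list2 : List Int) :
    ∀ (k i : Nat) (a b : Int) (t : List Int), list1.length - i = k →
      Compare2ListLoop list1 list2 i (a :: b :: t) =
        (a + ((List.range' i k).countP (pvMatchP list1 list2) : Int)) ::
        (b + ((List.range' i k).countP (fun j => ! pvMatchP list1 list2 j) : Int)) :: t := by
  intro k
  induction k with
  | zero =>
    intro i a b t hk
    rw [Compare2ListLoop]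
    simp [show ¬ i < list1.length by omega]
  | succ k ih =>
    intro i a b t hk
    have hi : i < list1.length := by omega
    rw [Compare2ListLoop]
    simp only [hi, dif_pos]
    rw [List.range'_succ, List.countP_cons, List.countP_cons]
    by_cases hp : (list1.getD i 0 == list2.getD i 0) = true
    · have hp' : list1[i]?.getD 0 = list2[i]?.getD 0 := by simpa [List.getD] using hp
      rw [if_pos hp]
      rw [show (a :: b :: t).set 0 ((a :: b :: t).getD 0 0 + 1) = (a + 1) :: b :: t by
        simp [List.getD]]
      rw [ih (i + 1) (a + 1) b t (by omega)]
      simp [pvMatchP, List.getD, hp']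
      ring
    · have hp' : ¬ list1[i]?.getD 0 = list2[i]?.getD 0 := by simpa [List.getD] using hp
      rw [if_neg hp]
      rw [show (a :: b :: t).set 1 ((a :: b :: t).getD 1 0 + 1) = a :: (b + 1) :: t by
        simp [List.getD]]
      rw [ih (i + 1) a (b + 1) t (by omega)]
      simp [pvMatchP, List.getD, hp']
      ring

lemma Compare2ListCount_spec (list1 list2 : List Int) :
    ∀ (k lo hi : Nat), hi - lo = k → lo ≤ hi →
      Compare2ListCount list1 list2 lo hi =
        (((List.range' lo k).countP (pvMatchP list1 list2) : Int),
         ((List.range' lo k).countP (fun j => ! pvMatchP list1 list2 j) : Int)) := by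
  intro k
  induction k using Nat.strong_induction_on with
  | _ k ih =>
    intro lo hi hk hle
    rw [Compare2ListCount]
    by_cases h0 : hi - lo = 0
    · simp [h0, show k = 0 by omega]
    · by_cases h1 : hi - lo = 1
      · have hk1 : k = 1 := by omega
        subst hk1
        have hhi : hi = lo + 1 := by omega
        simp only [h1, if_true]
        simp [pvMatchP, List.range'_succ, List.getD]
        split_ifs <;> simp
      · simp only [h0, h1, if_false]
        have h2 : 2 ≤ hi - lo := by omega
        have hmidlt : (lo + hi) / 2 < hi := by omega
        have hmidgt : lo < (lo + hi) / 2 := by omega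
        rw [ih ((lo + hi) / 2 - lo) (by omega) lo ((lo + hi) / 2) rfl (by omega),
            ih (hi - (lo + hi) / 2) (by omega) ((lo + hi) / 2) hi rfl (by omega)]
        have hr := List.range'_append (s := lo) (m := (lo + hi) / 2 - lo) (n := hi - (lo + hi) / 2) (step := 1)
        rw [show lo + 1 * ((lo + hi) / 2 - lo) = (lo + hi) / 2 by omega,
            show (lo + hi) / 2 - lo + (hi - (lo + hi) / 2) = k by omega] at hr
        rw [← hr, List.countP_append, List.countP_append]
        push_cast
        simp

-- ===== VERDICT (by name: the statement is the Claim_ definition above) =====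
theorem Compare2List_spec : Claim_equal_Compare2List := by
  intro list1 list2 list3 _hd hpre
  obtain ⟨_h12, h3⟩ := hpre
  obtain ⟨a, b, t, rfl⟩ : ∃ a b t, list3 = a :: b :: t := by
    match list3 with
    | a :: b :: t => exact ⟨a, b, t, rfl⟩
    | [] => simp at h3
    | [a] => simp at h3
  unfold Spec_Compare2List Compare2List Compare2List_alt
  rw [Compare2ListLoop_spec list1 list2 list1.length 0 a b t (by omega)]
  rw [Compare2ListCount_spec list1 list2 list1.length 0 list1.length (by omega) (by omega)]
  simp [List.getD]
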